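-- pv_equiv track=rewrite | github.com/Steven-Mugisha/rusty-byte | karat/q1.py | is_parent_of
-- ===== SOURCE A (Python) =====
-- parent_child_pairs = [
--     (1, 3),
--     (2, 3),
--     (3, 6),
--     (5, 6),
--     (5, 7),
--     (4, 5),
--     (4, 8),
--     (4, 9),
--     (9, 11),
-- ]
--
-- def is_parent_of(parent_child_pairs, A, B):
--     # Construct an adjacency list to represent the parent-child relationships
--     adjacency_list = {}
--     for parent, child in parent_child_pairs:
--         if parent not in adjacency_list:
--             adjacency_list[parent] = []
--         adjacency_list[parent].append(child)
--
--     # Check if there exists a path from A to B using a visited set to avoid cycles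
--     visited = set()
--
--     def dfs(node):
--         if node == B:
--             return True
--
--         visited.add(node)
--
--         for neighbor in adjacency_list.get(node, []):
--             if neighbor not in visited and dfs(neighbor):
--                 return True
--
--         return False
--
--     return dfs(A)
-- ===== SOURCE B (Python) =====
-- def is_parent_of(parent_child_pairs, A, B):
--     # Saturate the set of nodes reachable from A by repeatedly sweeping the
--     # pair list until no new node is added, then test membership of B.
--     reach = {A}
--     changed = True
--     while changed:
--         changed = False
--         for parent, child in parent_child_pairs:
--             if parent in reach and child not in reach:
--                 reach.add(child)
--                 changed = True
--     return B in reach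
-- ===== Notes on version B (the rewrite author's own statement) =====
-- stated objective: alternative
-- what changed: Replaces the adjacency-dict plus recursive DFS with an adjacency-free fixpoint saturation: repeatedly sweep the pair list adding children of already-reached parents until the reachable set is stable, then test B's membership.
import Mathlib
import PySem

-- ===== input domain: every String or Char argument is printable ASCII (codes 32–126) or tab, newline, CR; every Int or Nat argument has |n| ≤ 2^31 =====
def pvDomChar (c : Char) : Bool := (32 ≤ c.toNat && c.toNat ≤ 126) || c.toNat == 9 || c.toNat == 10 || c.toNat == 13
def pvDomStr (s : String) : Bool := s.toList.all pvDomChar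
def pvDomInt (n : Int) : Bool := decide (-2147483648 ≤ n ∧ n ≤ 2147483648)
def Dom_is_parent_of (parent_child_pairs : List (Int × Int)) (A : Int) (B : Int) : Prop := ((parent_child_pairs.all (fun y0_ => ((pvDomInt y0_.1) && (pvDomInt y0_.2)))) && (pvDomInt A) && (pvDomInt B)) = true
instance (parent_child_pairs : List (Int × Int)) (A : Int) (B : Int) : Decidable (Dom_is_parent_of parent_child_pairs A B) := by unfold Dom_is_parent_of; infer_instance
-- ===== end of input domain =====

-- B replaces A's adjacency-dict recursive DFS with an adjacency-free fixpoint
-- saturation of the reachable set (alternative algorithm, same return value).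

-- ===== PORT A =====
-- adjacency_list construction: 'if parent not in adj: adj[parent] = []' then append
def pvAdjStep (d : PySem.Dict Int (List Int)) (pc : Int × Int) : PySem.Dict Int (List Int) :=
  let d' := if d.contains pc.1 then d else d.insert pc.1 []
  d'.modify pc.1 [] (fun l => l ++ [pc.2])

def pvBuildAdj (parent_child_pairs : List (Int × Int)) : PySem.Dict Int (List Int) :=
  parent_child_pairs.foldl pvAdjStep PySem.Dict.empty

-- the recursive dfs with its shared 'visited' set; the for-loop over neighbors is
-- pvDfsLoop.  fuel only totalises the recursion (provably sufficient at the call site).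
mutual
def pvDfs (Btgt : Int) (adj : PySem.Dict Int (List Int)) :
    Nat → Int → PySem.Set Int → Bool × PySem.Set Int
  | 0, _, visited => (false, visited)
  | Nat.succ fuel, node, visited =>
    if node = Btgt then (true, visited)
    else pvDfsLoop Btgt adj fuel (adj.getD node []) (PySem.Set.add visited node)
  termination_by fuel _ _ => (fuel, 0)
def pvDfsLoop (Btgt : Int) (adj : PySem.Dict Int (List Int)) :
    Nat → List Int → PySem.Set Int → Bool × PySem.Set Int
  | _, [], visited => (false, visited)
  | fuel, n :: rest, visited =>
    if PySem.Set.contains visited n then pvDfsLoop Btgt adj fuel rest visited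
    else
      match pvDfs Btgt adj fuel n visited with
      | (true, v) => (true, v)
      | (false, v) => pvDfsLoop Btgt adj fuel rest v
  termination_by fuel ns _ => (fuel, ns.length + 1)
end

def is_parent_of (parent_child_pairs : List (Int × Int)) (A : Int) (B : Int) : Bool :=
  let adj := pvBuildAdj parent_child_pairs
  (pvDfs B adj (parent_child_pairs.length + 2) A PySem.Set.empty).1

-- ===== PORT B =====
-- one 'for parent, child in parent_child_pairs' sweep; state = (reach, changed)
def pvSatStep (st : PySem.Set Int × Bool) (pc : Int × Int) : PySem.Set Int × Bool :=
  if PySem.Set.contains st.1 pc.1 && ! PySem.Set.contains st.1 pc.2 then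
    (PySem.Set.add st.1 pc.2, true)
  else st

def pvSatPass (parent_child_pairs : List (Int × Int)) (reach : PySem.Set Int) :
    PySem.Set Int × Bool :=
  parent_child_pairs.foldl pvSatStep (reach, false)

-- the 'while changed' loop; fuel only totalises it (provably sufficient at the call site)
def pvSatLoop (parent_child_pairs : List (Int × Int)) : Nat → PySem.Set Int → PySem.Set Int
  | 0, reach => reach
  | Nat.succ fuel, reach =>
    if (pvSatPass parent_child_pairs reach).2 then
      pvSatLoop parent_child_pairs fuel (pvSatPass parent_child_pairs reach).1
    else (pvSatPass parent_child_pairs reach).1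

def is_parent_of_alt (parent_child_pairs : List (Int × Int)) (A : Int) (B : Int) : Bool :=
  PySem.Set.contains
    (pvSatLoop parent_child_pairs (parent_child_pairs.length + 1) (PySem.Set.add PySem.Set.empty A)) B

-- ===== PRECONDITION & SPEC =====
def Spec_is_parent_of (parent_child_pairs : List (Int × Int)) (A : Int) (B : Int) (out : Bool) : Prop := out = is_parent_of_alt parent_child_pairs A B
instance (parent_child_pairs : List (Int × Int)) (A : Int) (B : Int) (out : Bool) : Decidable (Spec_is_parent_of parent_child_pairs A B out) := by unfold Spec_is_parent_of; infer_instance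

-- ===== CLAIM (what is proved, stated in full; the proofs are below) =====
def Claim_equal_is_parent_of : Prop := ∀ (parent_child_pairs : List (Int × Int)) (A : Int) (B : Int), Dom_is_parent_of parent_child_pairs A B → Spec_is_parent_of parent_child_pairs A B (is_parent_of parent_child_pairs A B)

-- ===== LEMMAS AND PROOFS =====

-- Edge relation of the input pair list and reachability
def pvEdge (pairs : List (Int × Int)) (x y : Int) : Prop := (x, y) ∈ pairs

def pvReach (pairs : List (Int × Int)) : Int → Int → Prop := Relation.ReflTransGen (pvEdge pairs)

theorem pv_adjStep_getD (d : PySem.Dict Int (List Int)) (pc : Int × Int) (x : Int) :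
    (pvAdjStep d pc).getD x [] = if x = pc.1 then d.getD pc.1 [] ++ [pc.2] else d.getD x [] := by
  unfold pvAdjStep
  by_cases hc : d.contains pc.1 = true
  · simp [hc, PySem.Dict.getD_modify]
  · simp only [hc, Bool.false_eq_true, if_false, PySem.Dict.getD_modify]
    have h0 : d.getD pc.1 [] = [] := PySem.Dict.getD_of_not_contains _ _ (by simpa using hc)
    by_cases hx : x = pc.1
    · simp [hx, PySem.Dict.getD_insert_self, h0]
    · simp [hx, PySem.Dict.getD_insert_of_ne _ _ _ hx]

theorem pv_mem_foldl_adj (pairs : List (Int × Int)) (d : PySem.Dict Int (List Int)) (x y : Int) :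
    y ∈ (pairs.foldl pvAdjStep d).getD x [] ↔ y ∈ d.getD x [] ∨ (x, y) ∈ pairs := by
  induction pairs generalizing d with
  | nil => simp
  | cons pc rest ih =>
    by_cases hx : x = pc.1
    · subst hx
      simp only [List.foldl_cons, ih, pv_adjStep_getD, List.mem_cons]
      have hpc : ((pc.1, y) = pc) ↔ y = pc.2 := by
        cases pc; simp
      rw [hpc, if_true, List.mem_append, List.mem_singleton]
      tauto
    · simp only [List.foldl_cons, ih, pv_adjStep_getD, if_neg hx, List.mem_cons]
      have : ¬ ((x, y) = pc) := by
        cases pc; simp [Prod.ext_iff]; intro h; exact absurd h hx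
      tauto

-- the adjacency dict built by A holds exactly the pairs
theorem pv_mem_adj (pairs : List (Int × Int)) (x y : Int) :
    y ∈ (pvBuildAdj pairs).getD x [] ↔ (x, y) ∈ pairs := by
  unfold pvBuildAdj
  rw [pv_mem_foldl_adj]
  simp [PySem.Dict.getD_empty]

-- fuel measure: children not yet visited
def pvM (pairs : List (Int × Int)) (vis : List Int) : Nat :=
  ((pairs.map Prod.snd).filter (fun c => !(decide (c ∈ vis)))).length

theorem pv_filter_le (l : List Int) (p q : Int → Bool) (h : ∀ x, q x = true → p x = true) :
    (l.filter q).length ≤ (l.filter p).length := by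
  induction l with
  | nil => simp
  | cons a t ih =>
    by_cases hq : q a = true
    · simp only [List.filter_cons, hq, h a hq, if_true, List.length_cons]
      omega
    · cases hp : p a <;>
        simp only [List.filter_cons, hq, hp, if_false, if_true, Bool.false_eq_true,
          List.length_cons] <;> omega

theorem pv_filter_lt (l : List Int) (p q : Int → Bool) (h : ∀ x, q x = true → p x = true)
    (x0 : Int) (hx : x0 ∈ l) (hp : p x0 = true) (hq : q x0 = false) :
    (l.filter q).length < (l.filter p).length := by
  induction l with
  | nil => simp at hx
  | cons a t ih =>
    rcases List.mem_cons.1 hx with rfl | hx'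
    · simp only [List.filter_cons, hp, hq, if_true, Bool.false_eq_true, if_false,
        List.length_cons]
      exact Nat.lt_succ_of_le (pv_filter_le t p q h)
    · have := ih hx'
      by_cases hqa : q a = true
      · simp only [List.filter_cons, hqa, h a hqa, if_true, List.length_cons]; omega
      · cases hpa : p a <;>
          simp only [List.filter_cons, hqa, hpa, if_false, if_true, Bool.false_eq_true,
            List.length_cons] <;> omega

theorem pvM_antitone (pairs : List (Int × Int)) (vis w : List Int)
    (h : ∀ x ∈ vis, x ∈ w) : pvM pairs w ≤ pvM pairs vis := by
  unfold pvM
  refine pv_filter_le _ _ _ ?_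
  intro x hx
  simp only [Bool.not_eq_eq_eq_not, Bool.not_true, decide_eq_false_iff_not] at hx ⊢
  exact fun hv => hx (h x hv)

theorem pvM_lt (pairs : List (Int × Int)) (vis : List Int) (n : Int)
    (hn : n ∈ pairs.map Prod.snd) (hnv : n ∉ vis) :
    pvM pairs (PySem.Set.add vis n) < pvM pairs vis := by
  unfold pvM
  refine pv_filter_lt _ _ _ ?_ n hn ?_ ?_
  · intro x hx
    simp only [Bool.not_eq_eq_eq_not, Bool.not_true, decide_eq_false_iff_not,
      PySem.Set.mem_add] at hx ⊢
    exact fun hv => hx (Or.inl hv)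
  · simpa using hnv
  · simp [PySem.Set.mem_add]

-- visited only grows
theorem pv_loop_subset (Btgt : Int) (adj : PySem.Dict Int (List Int)) (fuel : Nat)
    (Hdfs : ∀ (n : Int) (vis : PySem.Set Int) (x : Int), x ∈ vis → x ∈ (pvDfs Btgt adj fuel n vis).2) :
    ∀ (ns : List Int) (vis : PySem.Set Int) (x : Int), x ∈ vis → x ∈ (pvDfsLoop Btgt adj fuel ns vis).2 := by
  intro ns
  induction ns with
  | nil => intro vis x hx; simpa [pvDfsLoop] using hx
  | cons n rest ih =>
    intro vis x hx
    by_cases hc : n ∈ vis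
    · simpa [pvDfsLoop, hc] using ih vis x hx
    · cases hd : pvDfs Btgt adj fuel n vis with
      | mk b v =>
        have hv : x ∈ v := by have := Hdfs n vis x hx; rwa [hd] at this
        cases b
        · simpa [pvDfsLoop, hc, hd] using ih v x hv
        · simpa [pvDfsLoop, hc, hd] using hv

theorem pv_dfs_subset (Btgt : Int) (adj : PySem.Dict Int (List Int)) :
    ∀ (fuel : Nat) (n : Int) (vis : PySem.Set Int) (x : Int), x ∈ vis → x ∈ (pvDfs Btgt adj fuel n vis).2 := by
  intro fuel
  induction fuel with
  | zero => intro n vis x hx; simpa [pvDfs] using hx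
  | succ fuel ih =>
    intro n vis x hx
    by_cases hb : n = Btgt
    · simpa [pvDfs, hb] using hx
    · have hx' : x ∈ PySem.Set.add vis n := (PySem.Set.mem_add _ _ _).2 (Or.inl hx)
      simpa [pvDfs, hb] using pv_loop_subset Btgt adj fuel ih _ _ x hx'

-- soundness: a true answer exhibits reachability
theorem pv_loop_sound_dfs (pairs : List (Int × Int)) (Btgt : Int) (fuel : Nat)
    (Hdfs : ∀ (n : Int) (vis : PySem.Set Int), (pvDfs Btgt (pvBuildAdj pairs) fuel n vis).1 = true → pvReach pairs n Btgt) :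
    ∀ (ns : List Int) (vis : PySem.Set Int),
      (pvDfsLoop Btgt (pvBuildAdj pairs) fuel ns vis).1 = true → ∃ n ∈ ns, pvReach pairs n Btgt := by
  intro ns
  induction ns with
  | nil => intro vis h; simp [pvDfsLoop] at h
  | cons n rest ih =>
    intro vis h
    by_cases hc : n ∈ vis
    · simp [pvDfsLoop, hc] at h
      obtain ⟨m, hm, hr⟩ := ih vis h
      exact ⟨m, List.mem_cons_of_mem _ hm, hr⟩
    · cases hd : pvDfs Btgt (pvBuildAdj pairs) fuel n vis with
      | mk b v =>
        cases b
        · simp [pvDfsLoop, hc, hd] at h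
          obtain ⟨m, hm, hr⟩ := ih v h
          exact ⟨m, List.mem_cons_of_mem _ hm, hr⟩
        · exact ⟨n, List.mem_cons_self, Hdfs n vis (by rw [hd])⟩

theorem pv_dfs_sound (pairs : List (Int × Int)) (Btgt : Int) :
    ∀ (fuel : Nat) (n : Int) (vis : PySem.Set Int),
      (pvDfs Btgt (pvBuildAdj pairs) fuel n vis).1 = true → pvReach pairs n Btgt := by
  intro fuel
  induction fuel with
  | zero => intro n vis h; simp [pvDfs] at h
  | succ fuel ih =>
    intro n vis h
    by_cases hb : n = Btgt
    · exact hb ▸ Relation.ReflTransGen.refl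
    · simp only [pvDfs, hb, if_false] at h
      obtain ⟨m, hm, hr⟩ := pv_loop_sound_dfs pairs Btgt fuel ih _ _ h
      exact Relation.ReflTransGen.head ((pv_mem_adj pairs n m).1 hm) hr

def pvClosedNew (pairs : List (Int × Int)) (Btgt : Int) (vis V : List Int) : Prop :=
  ∀ x ∈ V, x ∉ vis → x ≠ Btgt ∧ ∀ y, (x, y) ∈ pairs → y ∈ V

-- completeness invariant: with enough fuel, a false answer leaves a closed visited set
theorem pv_loop_closed_dfs (pairs : List (Int × Int)) (Btgt : Int) (fuel : Nat)
    (Hdfs : ∀ (n : Int) (vis : PySem.Set Int), pvM pairs (PySem.Set.add vis n) + 1 ≤ fuel → n ∉ vis →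
      (pvDfs Btgt (pvBuildAdj pairs) fuel n vis).1 = false →
      n ∈ (pvDfs Btgt (pvBuildAdj pairs) fuel n vis).2 ∧
      pvClosedNew pairs Btgt vis (pvDfs Btgt (pvBuildAdj pairs) fuel n vis).2) :
    ∀ (ns : List Int) (vis : PySem.Set Int), (∀ n ∈ ns, n ∈ pairs.map Prod.snd) → pvM pairs vis ≤ fuel →
      (pvDfsLoop Btgt (pvBuildAdj pairs) fuel ns vis).1 = false →
      (∀ n ∈ ns, n ∈ (pvDfsLoop Btgt (pvBuildAdj pairs) fuel ns vis).2) ∧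
      pvClosedNew pairs Btgt vis (pvDfsLoop Btgt (pvBuildAdj pairs) fuel ns vis).2 := by
  intro ns
  induction ns with
  | nil =>
    intro vis _ _ _
    refine ⟨by simp, ?_⟩
    intro x hx hxv
    simp only [pvDfsLoop] at hx
    exact absurd hx hxv
  | cons n rest ih =>
    intro vis hch hM hfalse
    by_cases hc : n ∈ vis
    · have h' : (pvDfsLoop Btgt (pvBuildAdj pairs) fuel rest vis).1 = false := by
        simpa [pvDfsLoop, hc] using hfalse
      obtain ⟨hmem, hcl⟩ := ih vis (fun m hm => hch m (List.mem_cons_of_mem _ hm)) hM h'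
      have hres : pvDfsLoop Btgt (pvBuildAdj pairs) fuel (n :: rest) vis
          = pvDfsLoop Btgt (pvBuildAdj pairs) fuel rest vis := by
        simp [pvDfsLoop, hc]
      rw [hres]
      refine ⟨?_, hcl⟩
      intro m hm
      rcases List.mem_cons.1 hm with rfl | hm'
      · exact pv_loop_subset _ _ _ (pv_dfs_subset _ _ _) _ _ _ hc
      · exact hmem m hm'
    · cases hd : pvDfs Btgt (pvBuildAdj pairs) fuel n vis with
      | mk b v =>
        cases b
        · have hres : pvDfsLoop Btgt (pvBuildAdj pairs) fuel (n :: rest) vis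
              = pvDfsLoop Btgt (pvBuildAdj pairs) fuel rest v := by
            simp [pvDfsLoop, hc, hd]
          rw [hres] at hfalse ⊢
          have hnch : n ∈ pairs.map Prod.snd := hch n List.mem_cons_self
          have hMn : pvM pairs (PySem.Set.add vis n) + 1 ≤ fuel := by
            have := pvM_lt pairs vis n hnch hc
            omega
          obtain ⟨hnv, hclv⟩ := Hdfs n vis hMn hc (by rw [hd])
          rw [hd] at hnv hclv
          have hsubv : ∀ x ∈ vis, x ∈ v := by
            intro x hx
            have := pv_dfs_subset Btgt (pvBuildAdj pairs) fuel n vis x hx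
            rwa [hd] at this
          have hMv : pvM pairs v ≤ fuel := le_trans (pvM_antitone pairs vis v hsubv) hM
          obtain ⟨hmem, hclV⟩ := ih v (fun m hm => hch m (List.mem_cons_of_mem _ hm)) hMv hfalse
          have hsubV : ∀ x ∈ v, x ∈ (pvDfsLoop Btgt (pvBuildAdj pairs) fuel rest v).2 :=
            fun x hx => pv_loop_subset _ _ _ (pv_dfs_subset _ _ _) _ _ x hx
          refine ⟨?_, ?_⟩
          · intro m hm
            rcases List.mem_cons.1 hm with rfl | hm'
            · exact hsubV _ hnv
            · exact hmem m hm'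
          · intro x hx hxvis
            by_cases hxv : x ∈ v
            · obtain ⟨hxb, hxe⟩ := hclv x hxv hxvis
              exact ⟨hxb, fun y hy => hsubV y (hxe y hy)⟩
            · exact hclV x hx hxv
        · exfalso
          have : (pvDfsLoop Btgt (pvBuildAdj pairs) fuel (n :: rest) vis).1 = true := by
            simp [pvDfsLoop, hc, hd]
          rw [this] at hfalse; simp at hfalse

theorem pv_dfs_closed (pairs : List (Int × Int)) (Btgt : Int) :
    ∀ (fuel : Nat) (n : Int) (vis : PySem.Set Int), pvM pairs (PySem.Set.add vis n) + 1 ≤ fuel → n ∉ vis →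
      (pvDfs Btgt (pvBuildAdj pairs) fuel n vis).1 = false →
      n ∈ (pvDfs Btgt (pvBuildAdj pairs) fuel n vis).2 ∧
      pvClosedNew pairs Btgt vis (pvDfs Btgt (pvBuildAdj pairs) fuel n vis).2 := by
  intro fuel
  induction fuel with
  | zero => intro n vis hM _ _; omega
  | succ fuel ih =>
    intro n vis hM hnv hfalse
    by_cases hb : n = Btgt
    · exfalso; simp [pvDfs, hb] at hfalse
    · have hres : pvDfs Btgt (pvBuildAdj pairs) (fuel + 1) n vis
          = pvDfsLoop Btgt (pvBuildAdj pairs) fuel ((pvBuildAdj pairs).getD n []) (PySem.Set.add vis n) := by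
        simp [pvDfs, hb]
      rw [hres] at hfalse ⊢
      have hch : ∀ m ∈ (pvBuildAdj pairs).getD n [], m ∈ pairs.map Prod.snd := by
        intro m hm
        exact List.mem_map.2 ⟨(n, m), (pv_mem_adj pairs n m).1 hm, rfl⟩
      have hM' : pvM pairs (PySem.Set.add vis n) ≤ fuel := by omega
      obtain ⟨hmem, hcl⟩ := pv_loop_closed_dfs pairs Btgt fuel ih _ _ hch hM' hfalse
      have hsub : ∀ x ∈ PySem.Set.add vis n,
          x ∈ (pvDfsLoop Btgt (pvBuildAdj pairs) fuel ((pvBuildAdj pairs).getD n []) (PySem.Set.add vis n)).2 :=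
        fun x hx => pv_loop_subset _ _ _ (pv_dfs_subset _ _ _) _ _ x hx
      refine ⟨hsub _ ((PySem.Set.mem_add _ _ _).2 (Or.inr rfl)), ?_⟩
      intro x hx hxvis
      by_cases hxn : x = n
      · subst hxn
        exact ⟨hb, fun y hy => hmem y ((pv_mem_adj pairs x y).2 hy)⟩
      · have hxan : x ∉ PySem.Set.add vis n := by
          rw [PySem.Set.mem_add]; rintro (h | h) <;> [exact hxvis h; exact hxn h]
        exact hcl x hx hxan

theorem pv_A_iff (pairs : List (Int × Int)) (A B : Int) :
    is_parent_of pairs A B = true ↔ pvReach pairs A B := by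
  constructor
  · intro h
    exact pv_dfs_sound pairs B _ A PySem.Set.empty (by simpa [is_parent_of] using h)
  · intro hr
    by_contra hf
    have hfalse : (pvDfs B (pvBuildAdj pairs) (pairs.length + 2) A PySem.Set.empty).1 = false := by
      have h' : ¬ (pvDfs B (pvBuildAdj pairs) (pairs.length + 2) A PySem.Set.empty).1 = true := by
        simpa [is_parent_of] using hf
      exact Bool.not_eq_true _ ▸ h'
    have hM : pvM pairs (PySem.Set.add PySem.Set.empty A) + 1 ≤ pairs.length + 2 := by
      have h1 : pvM pairs (PySem.Set.add PySem.Set.empty A) ≤ (pairs.map Prod.snd).length := by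
        unfold pvM; exact List.length_filter_le _ _
      simp only [List.length_map] at h1
      omega
    obtain ⟨hA, hcl⟩ := pv_dfs_closed pairs B (pairs.length + 2) A PySem.Set.empty hM (by simp [PySem.Set.empty]) hfalse
    have hreach_mem : ∀ y, pvReach pairs A y → y ∈ (pvDfs B (pvBuildAdj pairs) (pairs.length + 2) A PySem.Set.empty).2 := by
      intro y hy
      induction hy with
      | refl => exact hA
      | tail _ e ihy => exact (hcl _ ihy (by simp [PySem.Set.empty])).2 _ e
    exact absurd rfl (hcl B (hreach_mem B hr) (by simp [PySem.Set.empty])).1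

-- ===== B-side =====

theorem pv_nodup_sub_len (l l' : List Int) (h : l.Nodup) (hs : ∀ x ∈ l, x ∈ l') :
    l.length ≤ l'.length := by
  calc l.length = l.toFinset.card := (List.toFinset_card_of_nodup h).symm
    _ ≤ l'.toFinset.card := Finset.card_le_card (fun x hx => by
        simp only [List.mem_toFinset] at hx ⊢; exact hs x hx)
    _ ≤ l'.length := l'.toFinset_card_le

theorem pv_fold_mono (l : List (Int × Int)) :
    ∀ (st : PySem.Set Int × Bool) (x : Int), x ∈ st.1 → x ∈ (l.foldl pvSatStep st).1 := by
  induction l with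
  | nil => intro st x hx; simpa using hx
  | cons pc t ih =>
    intro st x hx
    refine ih (pvSatStep st pc) x ?_
    unfold pvSatStep
    split
    · exact (PySem.Set.mem_add _ _ _).2 (Or.inl hx)
    · exact hx

theorem pv_fold_prov (l : List (Int × Int)) :
    ∀ (st : PySem.Set Int × Bool) (x : Int), x ∈ (l.foldl pvSatStep st).1 →
      x ∈ st.1 ∨ x ∈ l.map Prod.snd := by
  induction l with
  | nil => intro st x hx; exact Or.inl hx
  | cons pc t ih =>
    intro st x hx
    rcases ih (pvSatStep st pc) x hx with h | h
    · unfold pvSatStep at h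
      split at h
      · rcases (PySem.Set.mem_add _ _ _).1 h with h' | h'
        · exact Or.inl h'
        · exact Or.inr (by simp [h'])
      · exact Or.inl h
    · exact Or.inr (List.mem_map.1 h |>.elim (fun a ha => List.mem_map.2 ⟨a, List.mem_cons_of_mem _ ha.1, ha.2⟩))

theorem pv_fold_nodup (l : List (Int × Int)) :
    ∀ (st : PySem.Set Int × Bool), st.1.Nodup → (l.foldl pvSatStep st).1.Nodup := by
  induction l with
  | nil => intro st h; simpa using h
  | cons pc t ih =>
    intro st h
    refine ih (pvSatStep st pc) ?_
    unfold pvSatStep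
    split
    · exact PySem.Set.nodup_add _ _ h
    · exact h

theorem pv_fold_false (l : List (Int × Int)) :
    ∀ (st : PySem.Set Int × Bool), (l.foldl pvSatStep st).2 = false →
      l.foldl pvSatStep st = st ∧ ∀ pc ∈ l, pc.1 ∈ st.1 → pc.2 ∈ st.1 := by
  induction l with
  | nil => intro st h; exact ⟨rfl, by simp⟩
  | cons pc t ih =>
    intro st h
    simp only [List.foldl_cons] at h ⊢
    by_cases hc : (PySem.Set.contains st.1 pc.1 && ! PySem.Set.contains st.1 pc.2) = true
    · exfalso
      have hst : (pvSatStep st pc).2 = true := by unfold pvSatStep; rw [if_pos hc]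
      obtain ⟨heq, -⟩ := ih (pvSatStep st pc) h
      rw [heq] at h
      rw [hst] at h
      simp at h
    · have hstep : pvSatStep st pc = st := by unfold pvSatStep; rw [if_neg hc]
      rw [hstep] at h ⊢
      obtain ⟨heq, hprop⟩ := ih st h
      refine ⟨heq, ?_⟩
      intro q hq
      rcases List.mem_cons.1 hq with rfl | hq'
      · intro h1
        by_contra h2
        apply hc
        simp only [Bool.and_eq_true, Bool.not_eq_true']
        exact ⟨(PySem.Set.contains_iff _ _).2 h1, by
          rw [← Bool.not_eq_true]
          exact fun hcn => h2 ((PySem.Set.contains_iff _ _).1 hcn)⟩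
      · exact hprop q hq'

theorem pv_fold_len (l : List (Int × Int)) :
    ∀ (st : PySem.Set Int × Bool), st.1.length ≤ (l.foldl pvSatStep st).1.length := by
  induction l with
  | nil => intro st; simp
  | cons pc t ih =>
    intro st
    refine le_trans ?_ (ih (pvSatStep st pc))
    unfold pvSatStep
    split
    · rename_i hc
      simp only [Bool.and_eq_true, Bool.not_eq_true'] at hc
      have : pc.2 ∉ st.1 := fun hm => by
        have h2 := (PySem.Set.contains_iff st.1 pc.2).2 hm
        rw [hc.2] at h2
        simp at h2
      rw [PySem.Set.add_of_not_mem this]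
      simp
    · exact le_refl _

theorem pv_fold_true (l : List (Int × Int)) :
    ∀ (st : PySem.Set Int × Bool), st.2 = false → (l.foldl pvSatStep st).2 = true →
      st.1.length < (l.foldl pvSatStep st).1.length := by
  induction l with
  | nil => intro st h0 h1; rw [List.foldl_nil] at h1; rw [h0] at h1; simp at h1
  | cons pc t ih =>
    intro st h0 h1
    simp only [List.foldl_cons] at h1 ⊢
    by_cases hc : (PySem.Set.contains st.1 pc.1 && ! PySem.Set.contains st.1 pc.2) = true
    · have hstep : pvSatStep st pc = (PySem.Set.add st.1 pc.2, true) := by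
        unfold pvSatStep; rw [if_pos hc]
      have hnm : pc.2 ∉ st.1 := by
        simp only [Bool.and_eq_true, Bool.not_eq_true'] at hc
        intro hm
        have := (PySem.Set.contains_iff st.1 pc.2).2 hm
        rw [hc.2] at this; simp at this
      have h2 : st.1.length < (pvSatStep st pc).1.length := by
        rw [hstep, PySem.Set.add_of_not_mem hnm]; simp
      exact lt_of_lt_of_le h2 (pv_fold_len t _)
    · have hstep : pvSatStep st pc = st := by unfold pvSatStep; rw [if_neg hc]
      rw [hstep] at h1 ⊢
      exact ih st h0 h1

theorem pv_fold_sound (pairs : List (Int × Int)) (A : Int) (l : List (Int × Int))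
    (hl : ∀ pc ∈ l, pc ∈ pairs) :
    ∀ (st : PySem.Set Int × Bool), (∀ x ∈ st.1, pvReach pairs A x) →
      ∀ x ∈ (l.foldl pvSatStep st).1, pvReach pairs A x := by
  induction l with
  | nil => intro st h x hx; exact h x (by simpa using hx)
  | cons pc t ih =>
    intro st h x hx
    refine ih (fun q hq => hl q (List.mem_cons_of_mem _ hq)) (pvSatStep st pc) ?_ x hx
    intro y hy
    unfold pvSatStep at hy
    split at hy
    · rename_i hc
      rcases (PySem.Set.mem_add _ _ _).1 hy with h' | h'
      · exact h y h'
      · subst h'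
        simp only [Bool.and_eq_true] at hc
        have h1 : pc.1 ∈ st.1 := (PySem.Set.contains_iff _ _).1 hc.1
        exact Relation.ReflTransGen.tail (h pc.1 h1) (hl pc List.mem_cons_self)
    · exact h y hy

theorem pv_loop_mono (pairs : List (Int × Int)) :
    ∀ (fuel : Nat) (reach : PySem.Set Int) (x : Int), x ∈ reach → x ∈ pvSatLoop pairs fuel reach := by
  intro fuel
  induction fuel with
  | zero => intro reach x hx; simpa [pvSatLoop] using hx
  | succ fuel ih =>
    intro reach x hx
    rw [pvSatLoop]
    split
    · exact ih _ x (pv_fold_mono pairs (reach, false) x hx)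
    · exact pv_fold_mono pairs (reach, false) x hx

theorem pv_loop_sound (pairs : List (Int × Int)) (A : Int) :
    ∀ (fuel : Nat) (reach : PySem.Set Int), (∀ x ∈ reach, pvReach pairs A x) →
      ∀ x ∈ pvSatLoop pairs fuel reach, pvReach pairs A x := by
  intro fuel
  induction fuel with
  | zero => intro reach h x hx; exact h x (by simpa [pvSatLoop] using hx)
  | succ fuel ih =>
    intro reach h x hx
    rw [pvSatLoop] at hx
    have hp := pv_fold_sound pairs A pairs (fun pc hpc => hpc) (reach, false) h
    split at hx
    · exact ih _ (fun y hy => hp y hy) x hx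
    · exact hp x hx

theorem pv_loop_closed (pairs : List (Int × Int)) (A : Int) :
    ∀ (fuel : Nat) (reach : PySem.Set Int), reach.Nodup →
      (∀ x ∈ reach, x ∈ A :: pairs.map Prod.snd) →
      pairs.length + 2 ≤ fuel + reach.length →
      ∀ pc ∈ pairs, pc.1 ∈ pvSatLoop pairs fuel reach → pc.2 ∈ pvSatLoop pairs fuel reach := by
  intro fuel
  induction fuel with
  | zero =>
    intro reach hnd hsub hf
    exfalso
    have := pv_nodup_sub_len reach (A :: pairs.map Prod.snd) hnd hsub
    simp only [List.length_cons, List.length_map] at this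
    omega
  | succ fuel ih =>
    intro reach hnd hsub hf pc hpc
    have e : pvSatLoop pairs (fuel + 1) reach =
        if (pvSatPass pairs reach).2 then pvSatLoop pairs fuel (pvSatPass pairs reach).1
        else (pvSatPass pairs reach).1 := by
      rw [pvSatLoop]
    cases hflag : (pvSatPass pairs reach).2
    · -- fixpoint reached: pass leaves reach unchanged and it is closed
      obtain ⟨heq, hprop⟩ := pv_fold_false pairs (reach, false) hflag
      rw [e, hflag]
      simp only [Bool.false_eq_true, if_false]
      have h1 : (pvSatPass pairs reach).1 = reach := by
        unfold pvSatPass; rw [heq]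
      rw [h1]
      exact hprop pc hpc
    · -- the pass grew the set: recurse with one fuel less
      rw [e, hflag]
      simp only [if_true]
      refine ih (pvSatPass pairs reach).1 ?_ ?_ ?_ pc hpc
      · exact pv_fold_nodup pairs (reach, false) hnd
      · intro x hx
        rcases pv_fold_prov pairs (reach, false) x hx with h | h
        · exact hsub x h
        · exact List.mem_cons_of_mem _ h
      · have := pv_fold_true pairs (reach, false) rfl hflag
        simp only at this
        unfold pvSatPass
        omega

theorem pv_B_iff (pairs : List (Int × Int)) (A B : Int) :
    is_parent_of_alt pairs A B = true ↔ pvReach pairs A B := by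
  unfold is_parent_of_alt
  rw [PySem.Set.contains_iff]
  constructor
  · intro h
    refine pv_loop_sound pairs A _ _ ?_ B h
    intro x hx
    have : x = A := by
      rcases (PySem.Set.mem_add _ _ _).1 hx with h' | h'
      · simp [PySem.Set.empty] at h'
      · exact h'
    exact this ▸ Relation.ReflTransGen.refl
  · intro hr
    have hA : A ∈ pvSatLoop pairs (pairs.length + 1) (PySem.Set.add PySem.Set.empty A) :=
      pv_loop_mono pairs _ _ A ((PySem.Set.mem_add _ _ _).2 (Or.inr rfl))
    have hcl := pv_loop_closed pairs A (pairs.length + 1) (PySem.Set.add PySem.Set.empty A)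
      (PySem.Set.nodup_add _ _ (by simp [PySem.Set.empty]))
      (fun x hx => by
        rcases (PySem.Set.mem_add _ _ _).1 hx with h' | h'
        · simp [PySem.Set.empty] at h'
        · simp [h'])
      (by
        have : (PySem.Set.add (PySem.Set.empty (α := Int)) A).length = 1 := by
          rw [PySem.Set.add_of_not_mem (by simp [PySem.Set.empty])]
          simp [PySem.Set.empty]
        omega)
    induction hr with
    | refl => exact hA
    | tail _ e ihy => exact hcl _ e ihy

-- ===== VERDICT (by name: the statement is the Claim_ definition above) =====
theorem is_parent_of_spec : Claim_equal_is_parent_of := by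
  intro pairs A B _
  unfold Spec_is_parent_of
  rw [Bool.eq_iff_iff, pv_A_iff, pv_B_iff]
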